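-- pv_equiv track=rewrite | github.com/swy0123/programmers | python/2022-11/2022-11-17/sungrokReport5_1.py | solution
-- ===== SOURCE A (Python) =====
-- def solution(l, s):
--     arr = [[0]*(s+1) for _ in range(l+1)]
--     if s<10:
--         for i in range(1, s+1):
--             arr[1][i] = 1
--         for i in range(1, l+1):
--             arr[i][1] = 1
--         for i in range(2, l+1):
--             for j in range(2, s+1):
--                 arr[i][j] = arr[i-1][j] + arr[i][j-1]
--     else:
--         for i in range(1, l+1):
--             arr[i][1] = 1
--         for i in range(1, 10):
--             arr[1][i] = 1
--         for i in range(2, l+1):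
--             for j in range(2, 10):
--                 arr[i][j] = arr[i-1][j] + arr[i][j-1]
--             for k in range(10, s+1):
--                 for a in range(0, 10):
--                     arr[i][k] += arr[i-1][k-a]
--
--
--     return arr[l][s]
-- ===== SOURCE B (Python) =====
-- def solution(l, s):
--     # rolling 1-D DP: g[j] = number of (digits so far) tuples of 0..9 summing to j,
--     # updated per digit via a prefix-sum sliding window; answer sums over first digit 1..9
--     g = [1] + [0] * s
--     for _ in range(l - 1):
--         p = []
--         t = 0
--         for x in g:
--             t += x
--             p.append(t)
--         g = [p[j] if j < 10 else p[j] - p[j - 10] for j in range(s + 1)]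
--     return sum(g[s - d] for d in range(1, 10) if s - d >= 0)
-- ===== Notes on version B (the rewrite author's own statement) =====
-- stated objective: faster
-- what changed: Replaces A's (l+1)x(s+1) two-branch DP table (with a 10-term inner convolution loop per cell) by a single rolling 1-D array updated per digit via a prefix-sum sliding window, summing over the leading digit at the end.
import Mathlib
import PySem

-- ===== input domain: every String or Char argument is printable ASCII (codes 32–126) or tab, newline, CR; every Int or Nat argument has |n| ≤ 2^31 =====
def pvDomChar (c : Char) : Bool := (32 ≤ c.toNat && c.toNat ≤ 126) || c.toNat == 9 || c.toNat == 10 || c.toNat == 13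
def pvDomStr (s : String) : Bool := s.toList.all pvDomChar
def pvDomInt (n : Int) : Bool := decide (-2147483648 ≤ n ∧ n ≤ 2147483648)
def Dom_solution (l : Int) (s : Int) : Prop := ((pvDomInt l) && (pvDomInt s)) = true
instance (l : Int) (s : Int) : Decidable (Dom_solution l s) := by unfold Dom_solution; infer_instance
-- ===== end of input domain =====

-- B replaces A's 2-D two-branch DP table by a rolling 1-D prefix-sum sliding-window DP (objective: faster, constant factor).

-- ===== PORT A =====
def solution (l : Int) (s : Int) : Int :=
  let arr : List (List Int) :=
    (PySem.List.pyRange 0 (l+1) 1).map (fun _ => List.replicate (s+1).toNat (0:Int))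
  let arr :=
    if s < 10 then
      let arr := (PySem.List.pyRange 1 (s+1) 1).foldl (fun arr i =>
        PySem.List.pySetD arr 1 (PySem.List.pySetD (PySem.List.pyGetD arr 1 []) i 1)) arr
      let arr := (PySem.List.pyRange 1 (l+1) 1).foldl (fun arr i =>
        PySem.List.pySetD arr i (PySem.List.pySetD (PySem.List.pyGetD arr i []) 1 1)) arr
      (PySem.List.pyRange 2 (l+1) 1).foldl (fun arr i =>
        (PySem.List.pyRange 2 (s+1) 1).foldl (fun arr j =>
          PySem.List.pySetD arr i (PySem.List.pySetD (PySem.List.pyGetD arr i []) j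
            (PySem.List.pyGetD (PySem.List.pyGetD arr (i-1) []) j 0 +
             PySem.List.pyGetD (PySem.List.pyGetD arr i []) (j-1) 0))) arr) arr
    else
      let arr := (PySem.List.pyRange 1 (l+1) 1).foldl (fun arr i =>
        PySem.List.pySetD arr i (PySem.List.pySetD (PySem.List.pyGetD arr i []) 1 1)) arr
      let arr := (PySem.List.pyRange 1 10 1).foldl (fun arr i =>
        PySem.List.pySetD arr 1 (PySem.List.pySetD (PySem.List.pyGetD arr 1 []) i 1)) arr
      (PySem.List.pyRange 2 (l+1) 1).foldl (fun arr i =>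
        let arr := (PySem.List.pyRange 2 10 1).foldl (fun arr j =>
          PySem.List.pySetD arr i (PySem.List.pySetD (PySem.List.pyGetD arr i []) j
            (PySem.List.pyGetD (PySem.List.pyGetD arr (i-1) []) j 0 +
             PySem.List.pyGetD (PySem.List.pyGetD arr i []) (j-1) 0))) arr
        (PySem.List.pyRange 10 (s+1) 1).foldl (fun arr k =>
          (PySem.List.pyRange 0 10 1).foldl (fun arr a =>
            PySem.List.pySetD arr i (PySem.List.pySetD (PySem.List.pyGetD arr i []) k
              (PySem.List.pyGetD (PySem.List.pyGetD arr i []) k 0 +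
               PySem.List.pyGetD (PySem.List.pyGetD arr (i-1) []) (k-a) 0))) arr) arr) arr
  PySem.List.pyGetD (PySem.List.pyGetD arr l []) s 0

-- ===== PORT B =====
def solution_alt (l : Int) (s : Int) : Int :=
  let g : List Int := [1] ++ List.replicate s.toNat (0:Int)
  let g := (PySem.List.pyRange 0 (l-1) 1).foldl (fun g _ =>
    let p := (g.foldl (fun (st : List Int × Int) x =>
      (st.1 ++ [st.2 + x], st.2 + x)) ([], 0)).1
    (PySem.List.pyRange 0 (s+1) 1).map (fun j =>
      if j < 10 then PySem.List.pyGetD p j 0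
      else PySem.List.pyGetD p j 0 - PySem.List.pyGetD p (j-10) 0)) g
  (PySem.List.pyRange 1 10 1).foldl (fun acc d =>
    acc + (if 0 ≤ s - d then PySem.List.pyGetD g (s - d) 0 else 0)) 0

-- ===== PRECONDITION & SPEC =====
-- Pre_ excludes exactly the inputs on which A raises IndexError: everything except l ≥ 1 ∧ s ≥ 1 and the pair (0, 0).
def Pre_solution (l : Int) (s : Int) : Prop := (1 ≤ l ∧ 1 ≤ s) ∨ (l = 0 ∧ s = 0)
instance (l : Int) (s : Int) : Decidable (Pre_solution l s) := by unfold Pre_solution; infer_instance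
def pvWitness_solution : Int × Int := (3, 5)
def Spec_solution (l : Int) (s : Int) (out : Int) : Prop := out = solution_alt l s
instance (l : Int) (s : Int) (out : Int) : Decidable (Spec_solution l s out) := by unfold Spec_solution; infer_instance

-- ===== CLAIM (what is proved, stated in full; the proofs are below) =====
def Claim_equal_solution : Prop := ∀ (l : Int) (s : Int), Dom_solution l s → Pre_solution l s → Spec_solution l s (solution l s)

-- ===== LEMMAS AND PROOFS =====

def win (f : Nat → Int) (j : Nat) : Int := ∑ a ∈ Finset.range 10, if a ≤ j then f (j - a) else 0
def F : Nat → Nat → Int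
  | 0 => fun j => if 1 ≤ j ∧ j ≤ 9 then 1 else 0
  | n+1 => fun j => win (F n) j
def N : Nat → Nat → Int
  | 0 => fun j => if j = 0 then 1 else 0
  | n+1 => fun j => win (N n) j
def dsum (h : Nat → Int) (j : Nat) : Int := ∑ d ∈ Finset.range 10, if 1 ≤ d ∧ d ≤ j then h (j - d) else 0

theorem F_zero (n : Nat) : F n 0 = 0 := by
  induction n with
  | zero => simp [F]
  | succ n ih => simp [F, win, ih]

theorem F_one (n : Nat) : F n 1 = 1 := by
  induction n with
  | zero => simp [F]
  | succ n ih =>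
    show win (F n) 1 = 1
    rw [win, show (10:Nat) = 2 + 8 by rfl, Finset.sum_range_add]
    simp [Finset.sum_range_succ, ih, F_zero]

theorem win_le9 (f : Nat → Int) (j : Nat) (h : j ≤ 9) :
    win f j = ∑ t ∈ Finset.range (j+1), f t := by
  rw [win]
  rw [show (10:Nat) = (j+1) + (9-j) by omega, Finset.sum_range_add]
  have h1 : ∑ a ∈ Finset.range (9-j), (if (j+1)+a ≤ j then f (j - ((j+1)+a)) else 0) = 0 := by
    apply Finset.sum_eq_zero; intro a _; simp; omega
  rw [h1, add_zero]
  have h2 : ∀ a ∈ Finset.range (j+1), (if a ≤ j then f (j - a) else 0) = f (j + 1 - 1 - a) := by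
    intro a ha; simp only [Finset.mem_range] at ha
    rw [if_pos (by omega)]; congr 1
  rw [Finset.sum_congr rfl h2, Finset.sum_range_reflect]

theorem win_ge10 (f : Nat → Int) (j : Nat) (h : 10 ≤ j) :
    win f j = ∑ a ∈ Finset.range 10, f (j - a) := by
  rw [win]; apply Finset.sum_congr rfl; intro a ha
  simp only [Finset.mem_range] at ha
  rw [if_pos (by omega)]

theorem F_eq_dsum_N (n : Nat) (j : Nat) : F n j = dsum (N n) j := by
  induction n generalizing j with
  | zero =>
    rw [dsum]
    by_cases hj : 1 ≤ j ∧ j ≤ 9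
    · rw [show (F 0 j) = 1 by simp [F, hj]]
      rw [Finset.sum_eq_single j]
      · simp [hj, N]
      · intro d _ hd; rw [ite_eq_right_iff]; intro hc; simp [N]; omega
      · intro hj'; simp at hj'; omega
    · rw [show (F 0 j) = 0 by simp [F]; omega]
      symm; apply Finset.sum_eq_zero; intro d hd
      simp only [Finset.mem_range] at hd
      rw [ite_eq_right_iff]; intro hc; simp [N]; omega
  | succ n ih =>
    show win (F n) j = dsum (N (n+1)) j
    rw [win]
    calc (∑ a ∈ Finset.range 10, if a ≤ j then F n (j-a) else 0)
        = ∑ a ∈ Finset.range 10, ∑ d ∈ Finset.range 10,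
            (if 1 ≤ d ∧ a + d ≤ j then N n (j - (a+d)) else 0) := by
          apply Finset.sum_congr rfl; intro a _
          by_cases ha : a ≤ j
          · rw [if_pos ha, ih, dsum]
            apply Finset.sum_congr rfl; intro d _
            by_cases hd : 1 ≤ d ∧ d ≤ j - a
            · rw [if_pos hd, if_pos (by omega)]; congr 1; omega
            · rw [if_neg hd, if_neg (by omega)]
          · rw [if_neg ha]; symm; apply Finset.sum_eq_zero; intro d _
            rw [ite_eq_right_iff]; intro hc; omega
      _ = ∑ d ∈ Finset.range 10, ∑ a ∈ Finset.range 10,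
            (if 1 ≤ d ∧ a + d ≤ j then N n (j - (a+d)) else 0) := Finset.sum_comm
      _ = dsum (N (n+1)) j := by
          rw [dsum]
          apply Finset.sum_congr rfl; intro d _
          by_cases hd : 1 ≤ d ∧ d ≤ j
          · rw [if_pos hd]
            show _ = win (N n) (j - d)
            rw [win]
            apply Finset.sum_congr rfl; intro a _
            by_cases ha : a + d ≤ j
            · rw [if_pos (by omega), if_pos (by omega)]; congr 1; omega
            · rw [if_neg (by omega), if_neg (by omega)]
          · rw [if_neg hd]; apply Finset.sum_eq_zero; intro a _
            rw [ite_eq_right_iff]; intro hc; omega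


def E (T : List (List Int)) (i j : Nat) : Int := (T.getD i []).getD j 0
def Shape (T : List (List Int)) (L S : Nat) : Prop :=
  T.length = L + 1 ∧ ∀ r ∈ T, r.length = S + 1
def wr (T : List (List Int)) (i j : Int) (v : Int) : List (List Int) :=
  PySem.List.pySetD T i (PySem.List.pySetD (PySem.List.pyGetD T i []) j v)

theorem pyGetD_toNat {α : Type} (xs : List α) (i : Int) (d : α) (h : 0 ≤ i) :
    PySem.List.pyGetD xs i d = xs.getD i.toNat d := by
  obtain ⟨n, rfl⟩ := Int.eq_ofNat_of_zero_le h
  rw [PySem.List.pyGetD_natCast]; simp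

theorem pySetD_toNat {α : Type} (xs : List α) (i : Int) (v : α) (h : 0 ≤ i) :
    PySem.List.pySetD xs i v = xs.set i.toNat v := by
  exact PySem.List.pySetD_of_nonneg _ _ h

theorem getD_set' {α : Type} (xs : List α) (a : Nat) (r : α) (i : Nat) (d : α) (ha : a < xs.length) :
    (xs.set a r).getD i d = if i = a then r else xs.getD i d := by
  by_cases h : i = a
  · subst h
    rw [if_pos rfl, List.getD_eq_getElem _ _ (by rw [List.length_set]; omega), List.getElem_set_self]
  · rw [if_neg h]
    by_cases h2 : i < xs.length
    · rw [List.getD_eq_getElem _ _ (by rw [List.length_set]; omega),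
        List.getElem_set_ne (by omega), List.getD_eq_getElem _ _ h2]
    · rw [List.getD_eq_default _ _ (by rw [List.length_set]; omega), List.getD_eq_default _ _ (by omega)]

theorem getD_mem' {α : Type} (xs : List α) (i : Nat) (d : α) (h : i < xs.length) :
    xs.getD i d ∈ xs := by
  rw [List.getD_eq_getElem _ _ h]; exact List.getElem_mem _

theorem wr_eq (T : List (List Int)) (i j : Int) (v : Int) (hi : 0 ≤ i) (hj : 0 ≤ j) :
    wr T i j v = T.set i.toNat ((T.getD i.toNat []).set j.toNat v) := by
  rw [wr, pySetD_toNat _ _ _ hi, pySetD_toNat _ _ _ hj, pyGetD_toNat _ _ _ hi]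

theorem Shape_wr (T : List (List Int)) (L S : Nat) (hT : Shape T L S)
    (i j : Int) (hi : 0 ≤ i) (hj : 0 ≤ j) (hiL : i.toNat ≤ L) (v : Int) : Shape (wr T i j v) L S := by
  rw [wr_eq _ _ _ _ hi hj]
  obtain ⟨h1, h2⟩ := hT
  refine ⟨by simpa using h1, ?_⟩
  intro r hr
  rcases List.mem_or_eq_of_mem_set hr with h | h
  · exact h2 r h
  · subst h
    rw [List.length_set]
    exact h2 _ (getD_mem' _ _ _ (by omega))

theorem E_wr (T : List (List Int)) (L S : Nat) (hT : Shape T L S)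
    (i j : Int) (hi : 0 ≤ i) (hiL : i.toNat ≤ L) (hj : 0 ≤ j) (hjS : j.toNat ≤ S) (v : Int)
    (i' j' : Nat) :
    E (wr T i j v) i' j' = if i' = i.toNat ∧ j' = j.toNat then v else E T i' j' := by
  obtain ⟨h1, h2⟩ := hT
  have hilen : i.toNat < T.length := by omega
  have hrlen : (T.getD i.toNat []).length = S + 1 := h2 _ (getD_mem' _ _ _ hilen)
  rw [wr_eq _ _ _ _ hi hj, E, E, getD_set' _ _ _ _ _ hilen]
  by_cases hii : i' = i.toNat
  · rw [if_pos hii]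
    rw [getD_set' _ _ _ _ _ (by omega)]
    by_cases hjj : j' = j.toNat
    · rw [if_pos hjj, if_pos ⟨hii, hjj⟩]
    · rw [if_neg hjj, if_neg (by tauto)]
      rw [hii]
  · rw [if_neg hii, if_neg (by tauto)]

theorem foldl_pyRange_succ {α : Type} (f : α → Int → α) (init : α) (a : Int) (m : Nat) :
    (PySem.List.pyRange a (a + ((m:Int)+1)) 1).foldl f init
      = f ((PySem.List.pyRange a (a + (m:Int)) 1).foldl f init) (a + m) := by
  rw [show a + ((m:Int)+1) = (a + (m:Int)) + 1 by ring,
    PySem.List.pyRange_one_succ_right (by omega), List.foldl_append]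
  rfl

def pascFill (f g : Nat → Int) : Nat → Int
  | 0 => g 0
  | 1 => g 1
  | (j+2) => f (j+2) + pascFill f g (j+1)
def preE (i j : Nat) : Int :=
  if i = 1 ∧ 1 ≤ j ∧ j ≤ 9 then 1 else if j = 1 ∧ 1 ≤ i then 1 else 0

theorem pascFill_congr (f f' g g' : Nat → Int) :
    ∀ j, (∀ t, t ≤ j → f t = f' t) → (∀ t, t ≤ j → g t = g' t) →
      pascFill f g j = pascFill f' g' j := by
  intro j
  induction j using Nat.strong_induction_on with
  | _ j ih =>
    match j with
    | 0 => intro _ hg; simpa [pascFill] using hg 0 (by omega)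
    | 1 => intro _ hg; simpa [pascFill] using hg 1 (by omega)
    | (j+2) =>
      intro hf hg
      rw [pascFill, pascFill, hf (j+2) (by omega),
        ih (j+1) (by omega) (fun t ht => hf t (by omega)) (fun t ht => hg t (by omega))]

theorem pasc_F (n : Nat) (g : Nat → Int) (hg0 : g 0 = 0) (hg1 : g 1 = 1) :
    ∀ j, j ≤ 9 → pascFill (F n) g j = F (n+1) j := by
  intro j
  induction j using Nat.strong_induction_on with
  | _ j ih =>
    match j with
    | 0 => intro _; rw [pascFill, hg0, F_zero]
    | 1 => intro _; rw [pascFill, hg1, F_one]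
    | (j+2) =>
      intro h9
      rw [pascFill, ih (j+1) (by omega) (by omega)]
      have e1 : F (n+1) (j+2) = ∑ t ∈ Finset.range ((j+2)+1), F n t := win_le9 _ _ (by omega)
      have e2 : F (n+1) (j+1) = ∑ t ∈ Finset.range ((j+1)+1), F n t := win_le9 _ _ (by omega)
      rw [e1, e2, Finset.sum_range_succ]
      have s3 : ∑ t ∈ Finset.range (j+2+1), F n t
          = ∑ x ∈ Finset.range (j+1), F n x + F n (j+1) + F n (j+2) := by
        rw [Finset.sum_range_succ, Finset.sum_range_succ]
      rw [s3]; ring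

-- row-1 fill: for i in range(1, b): arr[1][i] = 1
theorem phase_row1 (L S : Nat) (hL : 1 ≤ L) (T : List (List Int)) (hT : Shape T L S)
    (m : Nat) (hm : m ≤ S) (b : Int) (hb : b = 1 + (m:Int)) :
    Shape ((PySem.List.pyRange 1 b 1).foldl (fun arr i =>
      PySem.List.pySetD arr 1 (PySem.List.pySetD (PySem.List.pyGetD arr 1 []) i 1)) T) L S ∧
    ∀ i' j', E ((PySem.List.pyRange 1 b 1).foldl (fun arr i =>
      PySem.List.pySetD arr 1 (PySem.List.pySetD (PySem.List.pyGetD arr 1 []) i 1)) T) i' j'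
      = if i' = 1 ∧ 1 ≤ j' ∧ j' ≤ m then 1 else E T i' j' := by
  subst hb
  induction m with
  | zero =>
    rw [PySem.List.pyRange_one_eq_nil (by omega)]
    exact ⟨hT, fun i' j' => by simp [List.foldl]; intro h1 h2 h3; omega⟩
  | succ m ih =>
    obtain ⟨ihS, ihE⟩ := ih (by omega)
    rw [show (1:Int) + ((m:Nat)+1:Nat) = 1 + ((m:Int)+1) by push_cast; ring, foldl_pyRange_succ]
    set R := (PySem.List.pyRange 1 (1 + (m:Int)) 1).foldl (fun arr i =>
      PySem.List.pySetD arr 1 (PySem.List.pySetD (PySem.List.pyGetD arr 1 []) i 1)) T with hR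
    have hwr : PySem.List.pySetD R 1 (PySem.List.pySetD (PySem.List.pyGetD R 1 []) (1+(m:Int)) 1) = wr R 1 (1+(m:Int)) 1 := rfl
    rw [hwr]
    refine ⟨Shape_wr R L S ihS _ _ (by omega) (by omega) (by simpa using hL) 1, ?_⟩
    intro i' j'
    rw [E_wr R L S ihS _ _ (by omega) (by simpa using hL) (by omega) (by simp; omega) 1 i' j', ihE]
    have h1 : ((1:Int) + (m:Int)).toNat = 1 + m := by omega
    have h2 : ((1:Int)).toNat = 1 := by omega
    rw [h1, h2]
    split_ifs <;> omega

theorem phase_col1 (L S : Nat) (hS : 1 ≤ S) (T : List (List Int)) (hT : Shape T L S)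
    (m : Nat) (hm : m ≤ L) (b : Int) (hb : b = 1 + (m:Int)) :
    Shape ((PySem.List.pyRange 1 b 1).foldl (fun arr i =>
      PySem.List.pySetD arr i (PySem.List.pySetD (PySem.List.pyGetD arr i []) 1 1)) T) L S ∧
    ∀ i' j', E ((PySem.List.pyRange 1 b 1).foldl (fun arr i =>
      PySem.List.pySetD arr i (PySem.List.pySetD (PySem.List.pyGetD arr i []) 1 1)) T) i' j'
      = if j' = 1 ∧ 1 ≤ i' ∧ i' ≤ m then 1 else E T i' j' := by
  subst hb
  induction m with
  | zero =>
    rw [PySem.List.pyRange_one_eq_nil (by omega)]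
    exact ⟨hT, fun i' j' => by simp [List.foldl]; intro h1 h2 h3; omega⟩
  | succ m ih =>
    obtain ⟨ihS, ihE⟩ := ih (by omega)
    rw [show (1:Int) + ((m:Nat)+1:Nat) = 1 + ((m:Int)+1) by push_cast; ring, foldl_pyRange_succ]
    set R := (PySem.List.pyRange 1 (1 + (m:Int)) 1).foldl (fun arr i =>
      PySem.List.pySetD arr i (PySem.List.pySetD (PySem.List.pyGetD arr i []) 1 1)) T with hR
    have hwr : PySem.List.pySetD R (1+(m:Int)) (PySem.List.pySetD (PySem.List.pyGetD R (1+(m:Int)) []) 1 1)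
        = wr R (1+(m:Int)) 1 1 := rfl
    rw [hwr]
    refine ⟨Shape_wr R L S ihS _ _ (by omega) (by omega) (by simp; omega) 1, ?_⟩
    intro i' j'
    rw [E_wr R L S ihS _ _ (by omega) (by simp; omega) (by omega) (by simp; omega) 1 i' j', ihE]
    have h1 : ((1:Int) + (m:Int)).toNat = 1 + m := by omega
    have h2 : ((1:Int)).toNat = 1 := by omega
    rw [h1, h2]
    split_ifs <;> omega

theorem phase_pascal (L S : Nat) (T : List (List Int)) (hT : Shape T L S)
    (iZ : Int) (i : Nat) (hiZ : iZ = (i:Int)) (hi1 : 1 ≤ i) (hiL : i ≤ L)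
    (m : Nat) (hm : 1 + m ≤ S) (b : Int) (hb : b = 2 + (m:Int)) :
    Shape ((PySem.List.pyRange 2 b 1).foldl (fun arr j =>
      PySem.List.pySetD arr iZ (PySem.List.pySetD (PySem.List.pyGetD arr iZ []) j
        (PySem.List.pyGetD (PySem.List.pyGetD arr (iZ-1) []) j 0 +
         PySem.List.pyGetD (PySem.List.pyGetD arr iZ []) (j-1) 0))) T) L S ∧
    ∀ i' j', E ((PySem.List.pyRange 2 b 1).foldl (fun arr j =>
      PySem.List.pySetD arr iZ (PySem.List.pySetD (PySem.List.pyGetD arr iZ []) j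
        (PySem.List.pyGetD (PySem.List.pyGetD arr (iZ-1) []) j 0 +
         PySem.List.pyGetD (PySem.List.pyGetD arr iZ []) (j-1) 0))) T) i' j'
      = if i' = i ∧ 2 ≤ j' ∧ j' ≤ 1 + m then pascFill (E T (i-1)) (E T i) j' else E T i' j' := by
  subst hb; subst hiZ
  induction m with
  | zero =>
    rw [PySem.List.pyRange_one_eq_nil (by omega)]
    exact ⟨hT, fun i' j' => by simp [List.foldl]; intro h1 h2 h3; omega⟩
  | succ m ih =>
    obtain ⟨ihS, ihE⟩ := ih (by omega)
    rw [show (2:Int) + ((m:Nat)+1:Nat) = 2 + ((m:Int)+1) by push_cast; ring, foldl_pyRange_succ]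
    set R := (PySem.List.pyRange 2 (2 + (m:Int)) 1).foldl (fun arr j =>
      PySem.List.pySetD arr (i:Int) (PySem.List.pySetD (PySem.List.pyGetD arr (i:Int) []) j
        (PySem.List.pyGetD (PySem.List.pyGetD arr ((i:Int)-1) []) j 0 +
         PySem.List.pyGetD (PySem.List.pyGetD arr (i:Int) []) (j-1) 0))) T with hR
    have hwr : ∀ v, PySem.List.pySetD R (i:Int) (PySem.List.pySetD (PySem.List.pyGetD R (i:Int) []) (2+(m:Int)) v)
        = wr R (i:Int) (2+(m:Int)) v := fun _ => rfl
    rw [hwr]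
    -- the two reads
    have hread1 : PySem.List.pyGetD (PySem.List.pyGetD R ((i:Int)-1) []) (2+(m:Int)) 0
        = E T (i-1) (2+m) := by
      rw [pyGetD_toNat _ _ _ (by omega), pyGetD_toNat _ _ _ (by omega)]
      show E R ((i:Int)-1).toNat ((2:Int)+(m:Int)).toNat = _
      have t1 : ((i:Int)-1).toNat = i - 1 := by omega
      have t2 : ((2:Int)+(m:Int)).toNat = 2 + m := by omega
      rw [t1, t2, ihE, if_neg (by omega)]
    have hread2 : PySem.List.pyGetD (PySem.List.pyGetD R (i:Int) []) (2+(m:Int)-1) 0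
        = pascFill (E T (i-1)) (E T i) (1+m) := by
      rw [pyGetD_toNat _ _ _ (by omega), pyGetD_toNat _ _ _ (by omega)]
      show E R ((i:Int)).toNat ((2:Int)+(m:Int)-1).toNat = _
      have t1 : ((i:Int)).toNat = i := by omega
      have t2 : ((2:Int)+(m:Int)-1).toNat = 1 + m := by omega
      rw [t1, t2, ihE]
      rcases Nat.eq_zero_or_pos m with hm0 | hm0
      · subst hm0
        rw [if_neg (by omega)]
        show E T i 1 = pascFill (E T (i-1)) (E T i) 1
        rw [pascFill]
      · rw [if_pos (by omega)]
    rw [hread1, hread2]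
    refine ⟨Shape_wr R L S ihS _ _ (by omega) (by omega) (by omega) _, ?_⟩
    intro i' j'
    rw [E_wr R L S ihS _ _ (by omega) (by omega) (by omega) (by omega) _ i' j', ihE]
    have t1 : ((i:Int)).toNat = i := by omega
    have t2 : ((2:Int)+(m:Int)).toNat = 2 + m := by omega
    rw [t1, t2]
    have hstep : E T (i-1) (2+m) + pascFill (E T (i-1)) (E T i) (1+m)
        = pascFill (E T (i-1)) (E T i) (2+m) := by
      have e : 2 + m = (m+2) := by omega
      have e1 : 1 + m = (m+1) := by omega
      rw [e, e1, pascFill]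
    by_cases hc1 : i' = i ∧ j' = 2 + m
    · obtain ⟨hA, hB⟩ := hc1
      rw [if_pos ⟨hA, hB⟩, if_pos (by omega), hB, hstep]
    · rw [if_neg hc1]
      by_cases hc2 : i' = i ∧ 2 ≤ j' ∧ j' ≤ 1 + m
      · rw [if_pos hc2, if_pos (by omega)]
      · rw [if_neg hc2, if_neg (by omega)]

theorem phase_wininner (L S : Nat) (T : List (List Int)) (hT : Shape T L S)
    (iZ : Int) (i : Nat) (hiZ : iZ = (i:Int)) (hi1 : 1 ≤ i) (hiL : i ≤ L)
    (kZ : Int) (k : Nat) (hkZ : kZ = (k:Int)) (hk10 : 10 ≤ k) (hkS : k ≤ S)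
    (m : Nat) (hm : m ≤ 10) (b : Int) (hb : b = (m:Int)) :
    Shape ((PySem.List.pyRange 0 b 1).foldl (fun arr a =>
      PySem.List.pySetD arr iZ (PySem.List.pySetD (PySem.List.pyGetD arr iZ []) kZ
        (PySem.List.pyGetD (PySem.List.pyGetD arr iZ []) kZ 0 +
         PySem.List.pyGetD (PySem.List.pyGetD arr (iZ-1) []) (kZ-a) 0))) T) L S ∧
    ∀ i' j', E ((PySem.List.pyRange 0 b 1).foldl (fun arr a =>
      PySem.List.pySetD arr iZ (PySem.List.pySetD (PySem.List.pyGetD arr iZ []) kZ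
        (PySem.List.pyGetD (PySem.List.pyGetD arr iZ []) kZ 0 +
         PySem.List.pyGetD (PySem.List.pyGetD arr (iZ-1) []) (kZ-a) 0))) T) i' j'
      = if i' = i ∧ j' = k then E T i k + ∑ a ∈ Finset.range m, E T (i-1) (k-a)
        else E T i' j' := by
  subst hb; subst hiZ; subst hkZ
  induction m with
  | zero =>
    rw [show ((0:Nat):Int) = 0 from rfl, PySem.List.pyRange_one_eq_nil (by omega)]
    refine ⟨hT, fun i' j' => ?_⟩
    simp only [List.foldl, Finset.range_zero, Finset.sum_empty, add_zero]
    by_cases hc : i' = i ∧ j' = k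
    · rw [if_pos hc, hc.1, hc.2]
    · rw [if_neg hc]
  | succ m ih =>
    obtain ⟨ihS, ihE⟩ := ih (by omega)
    rw [show (((m:Nat)+1:Nat):Int) = 0 + ((m:Int)+1) by push_cast; ring, foldl_pyRange_succ,
      show (0:Int) + (m:Int) = (m:Int) by ring]
    set R := (PySem.List.pyRange 0 (m:Int) 1).foldl (fun arr a =>
      PySem.List.pySetD arr (i:Int) (PySem.List.pySetD (PySem.List.pyGetD arr (i:Int) []) (k:Int)
        (PySem.List.pyGetD (PySem.List.pyGetD arr (i:Int) []) (k:Int) 0 +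
         PySem.List.pyGetD (PySem.List.pyGetD arr ((i:Int)-1) []) ((k:Int)-a) 0))) T with hR
    have hwr : ∀ v, PySem.List.pySetD R (i:Int) (PySem.List.pySetD (PySem.List.pyGetD R (i:Int) []) (k:Int) v)
        = wr R (i:Int) (k:Int) v := fun _ => rfl
    rw [hwr]
    have hread1 : PySem.List.pyGetD (PySem.List.pyGetD R (i:Int) []) (k:Int) 0
        = E T i k + ∑ a ∈ Finset.range m, E T (i-1) (k-a) := by
      rw [pyGetD_toNat _ _ _ (by omega), pyGetD_toNat _ _ _ (by omega)]
      show E R ((i:Int)).toNat ((k:Int)).toNat = _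
      have t1 : ((i:Int)).toNat = i := by omega
      have t2 : ((k:Int)).toNat = k := by omega
      rw [t1, t2, ihE, if_pos ⟨rfl, rfl⟩]
    have hread2 : PySem.List.pyGetD (PySem.List.pyGetD R ((i:Int)-1) []) ((k:Int)-(m:Int)) 0
        = E T (i-1) (k-m) := by
      rw [pyGetD_toNat _ _ _ (by omega), pyGetD_toNat _ _ _ (by omega)]
      show E R ((i:Int)-1).toNat ((k:Int)-(m:Int)).toNat = _
      have t1 : ((i:Int)-1).toNat = i - 1 := by omega
      have t2 : ((k:Int)-(m:Int)).toNat = k - m := by omega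
      rw [t1, t2, ihE, if_neg (by omega)]
    rw [hread1, hread2]
    refine ⟨Shape_wr R L S ihS _ _ (by omega) (by omega) (by omega) _, ?_⟩
    intro i' j'
    rw [E_wr R L S ihS _ _ (by omega) (by omega) (by omega) (by omega) _ i' j', ihE]
    have t1 : ((i:Int)).toNat = i := by omega
    have t2 : ((k:Int)).toNat = k := by omega
    rw [t1, t2]
    have hsum : E T i k + ∑ a ∈ Finset.range m, E T (i-1) (k-a) + E T (i-1) (k-m)
        = E T i k + ∑ a ∈ Finset.range (m+1), E T (i-1) (k-a) := by
      rw [Finset.sum_range_succ]; ring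
    by_cases hc : i' = i ∧ j' = k
    · simp only [if_pos hc]
      exact hsum
    · simp only [if_neg hc]

theorem phase_winouter (L S : Nat) (T : List (List Int)) (hT : Shape T L S)
    (iZ : Int) (i : Nat) (hiZ : iZ = (i:Int)) (hi1 : 1 ≤ i) (hiL : i ≤ L)
    (m : Nat) (hm : 9 + m ≤ S) (b : Int) (hb : b = 10 + (m:Int)) :
    Shape ((PySem.List.pyRange 10 b 1).foldl (fun arr k =>
      (PySem.List.pyRange 0 10 1).foldl (fun arr a =>
        PySem.List.pySetD arr iZ (PySem.List.pySetD (PySem.List.pyGetD arr iZ []) k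
          (PySem.List.pyGetD (PySem.List.pyGetD arr iZ []) k 0 +
           PySem.List.pyGetD (PySem.List.pyGetD arr (iZ-1) []) (k-a) 0))) arr) T) L S ∧
    ∀ i' j', E ((PySem.List.pyRange 10 b 1).foldl (fun arr k =>
      (PySem.List.pyRange 0 10 1).foldl (fun arr a =>
        PySem.List.pySetD arr iZ (PySem.List.pySetD (PySem.List.pyGetD arr iZ []) k
          (PySem.List.pyGetD (PySem.List.pyGetD arr iZ []) k 0 +
           PySem.List.pyGetD (PySem.List.pyGetD arr (iZ-1) []) (k-a) 0))) arr) T) i' j'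
      = if i' = i ∧ 10 ≤ j' ∧ j' ≤ 9 + m
          then E T i j' + ∑ a ∈ Finset.range 10, E T (i-1) (j'-a)
          else E T i' j' := by
  subst hb; subst hiZ
  induction m with
  | zero =>
    rw [show PySem.List.pyRange 10 (10 + ((0:Nat):Int)) 1 = [] from
      PySem.List.pyRange_one_eq_nil (by omega), List.foldl_nil]
    exact ⟨hT, fun i' j' => by
      rw [if_neg (by rintro ⟨h1, h2, h3⟩; omega)]⟩
  | succ m ih =>
    obtain ⟨ihS, ihE⟩ := ih (by omega)
    rw [show (10:Int) + ((m:Nat)+1:Nat) = 10 + ((m:Int)+1) by push_cast; ring, foldl_pyRange_succ]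
    set R := (PySem.List.pyRange 10 (10 + (m:Int)) 1).foldl (fun arr k =>
      (PySem.List.pyRange 0 10 1).foldl (fun arr a =>
        PySem.List.pySetD arr (i:Int) (PySem.List.pySetD (PySem.List.pyGetD arr (i:Int) []) k
          (PySem.List.pyGetD (PySem.List.pyGetD arr (i:Int) []) k 0 +
           PySem.List.pyGetD (PySem.List.pyGetD arr ((i:Int)-1) []) (k-a) 0))) arr) T with hR
    obtain ⟨wS, wE⟩ := phase_wininner L S R ihS (i:Int) i rfl hi1 hiL
      (10 + (m:Int)) (10+m) (by push_cast; ring) (by omega) (by omega)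
      10 (by omega) 10 (by norm_num)
    refine ⟨wS, ?_⟩
    intro i' j'
    rw [wE i' j']
    have hRik : E R i (10+m) = E T i (10+m) := by rw [ihE, if_neg (by omega)]
    have hRrow : ∀ a ∈ Finset.range 10, E R (i-1) (10+m-a) = E T (i-1) (10+m-a) := by
      intro a _; rw [ihE, if_neg (by omega)]
    by_cases hc : i' = i ∧ j' = 10 + m
    · obtain ⟨hA, hB⟩ := hc
      have hsum : (∑ a ∈ Finset.range 10, E R (i-1) (10+m-a))
          = ∑ a ∈ Finset.range 10, E T (i-1) (10+m-a) := Finset.sum_congr rfl hRrow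
      rw [if_pos ⟨hA, hB⟩, ihE, if_neg (by omega), hA, hB, if_pos (by omega)]
      exact congrArg (fun z => E T i (10+m) + z) hsum
    · rw [if_neg hc, ihE]
      by_cases hc2 : i' = i ∧ 10 ≤ j' ∧ j' ≤ 9 + m
      · rw [if_pos hc2, if_pos (by omega)]
      · rw [if_neg hc2, if_neg (by omega)]

theorem preE_one (j : Nat) : preE 1 j = F 0 j := by
  unfold preE F
  split_ifs <;> first | rfl | omega

theorem preE_lo (i : Nat) (hi : 2 ≤ i) (j : Nat) (n : Nat) (hj : j ≤ 1) :
    preE i j = F n j := by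
  rcases Nat.le_one_iff_eq_zero_or_eq_one.mp hj with h | h <;> subst h
  · rw [F_zero]; unfold preE
    rw [if_neg (by rintro ⟨h1, h2, h3⟩; omega), if_neg (by rintro ⟨h1, h2⟩; omega)]
  · rw [F_one]; unfold preE
    rw [if_neg (by rintro ⟨h1, h2, h3⟩; omega), if_pos ⟨rfl, by omega⟩]

theorem preE_cur0 (i : Nat) (hi : 2 ≤ i) : preE i 0 = 0 := by
  unfold preE
  rw [if_neg (by rintro ⟨h1, h2, h3⟩; omega), if_neg (by rintro ⟨h1, h2⟩; omega)]

theorem preE_cur1 (i : Nat) (hi : 2 ≤ i) : preE i 1 = 1 := by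
  unfold preE
  rw [if_neg (by rintro ⟨h1, h2, h3⟩; omega), if_pos ⟨rfl, by omega⟩]

theorem outer_small (L S : Nat) (hL : 1 ≤ L) (hS : 1 ≤ S) (hS9 : S ≤ 9)
    (sZ : Int) (hsZ : sZ = (S:Int))
    (T : List (List Int)) (hT : Shape T L S)
    (hbase : ∀ i', i' ≤ L → ∀ j', j' ≤ S → E T i' j' = preE i' j')
    (m : Nat) (hm : 1 + m ≤ L) (b : Int) (hb : b = 2 + (m:Int)) :
    Shape ((PySem.List.pyRange 2 b 1).foldl (fun arr i =>
      (PySem.List.pyRange 2 (sZ+1) 1).foldl (fun arr j =>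
        PySem.List.pySetD arr i (PySem.List.pySetD (PySem.List.pyGetD arr i []) j
          (PySem.List.pyGetD (PySem.List.pyGetD arr (i-1) []) j 0 +
           PySem.List.pyGetD (PySem.List.pyGetD arr i []) (j-1) 0))) arr) T) L S ∧
    ∀ i', i' ≤ L → ∀ j', j' ≤ S →
      E ((PySem.List.pyRange 2 b 1).foldl (fun arr i =>
        (PySem.List.pyRange 2 (sZ+1) 1).foldl (fun arr j =>
          PySem.List.pySetD arr i (PySem.List.pySetD (PySem.List.pyGetD arr i []) j
            (PySem.List.pyGetD (PySem.List.pyGetD arr (i-1) []) j 0 +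
             PySem.List.pyGetD (PySem.List.pyGetD arr i []) (j-1) 0))) arr) T) i' j'
        = if 1 ≤ i' ∧ i' ≤ 1 + m then F (i'-1) j' else preE i' j' := by
  subst hb; subst hsZ
  induction m with
  | zero =>
    rw [show PySem.List.pyRange 2 (2 + ((0:Nat):Int)) 1 = [] from
      PySem.List.pyRange_one_eq_nil (by omega), List.foldl_nil]
    refine ⟨hT, fun i' hi' j' hj' => ?_⟩
    rw [hbase i' hi' j' hj']
    by_cases hc : 1 ≤ i' ∧ i' ≤ 1
    · rw [if_pos hc, show i' = 1 by omega, preE_one]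
    · rw [if_neg hc]
  | succ m ih =>
    obtain ⟨ihS, ihE⟩ := ih (by omega)
    rw [show (2:Int) + ((m:Nat)+1:Nat) = 2 + ((m:Int)+1) by push_cast; ring, foldl_pyRange_succ]
    set R := (PySem.List.pyRange 2 (2 + (m:Int)) 1).foldl (fun arr i =>
      (PySem.List.pyRange 2 ((S:Int)+1) 1).foldl (fun arr j =>
        PySem.List.pySetD arr i (PySem.List.pySetD (PySem.List.pyGetD arr i []) j
          (PySem.List.pyGetD (PySem.List.pyGetD arr (i-1) []) j 0 +
           PySem.List.pyGetD (PySem.List.pyGetD arr i []) (j-1) 0))) arr) T with hR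
    obtain ⟨pS, pE⟩ := phase_pascal L S R ihS (2 + (m:Int)) (2+m) (by push_cast; ring)
      (by omega) (by omega) (S-1) (by omega) ((S:Int)+1) (by omega)
    refine ⟨pS, ?_⟩
    intro i' hi' j' hj'
    rw [pE i' j']
    have hrow_above : ∀ t, t ≤ S → E R (2+m-1) t = F m t := by
      intro t ht
      rw [ihE (2+m-1) (by omega) t ht, if_pos (by omega)]
      have : 2+m-1-1 = m := by omega
      rw [this]
    have hrow_cur : ∀ t, t ≤ S → E R (2+m) t = preE (2+m) t := by
      intro t ht
      rw [ihE (2+m) (by omega) t ht, if_neg (by omega)]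
    by_cases hI : i' = 2+m
    · subst hI
      by_cases hJ : 2 ≤ j'
      · rw [if_pos ⟨rfl, by omega⟩, if_pos (by omega)]
        have hcongr : pascFill (E R (2+m-1)) (E R (2+m)) j'
            = pascFill (F m) (fun t => preE (2+m) t) j' :=
          pascFill_congr _ _ _ _ j' (fun t ht => hrow_above t (by omega))
            (fun t ht => hrow_cur t (by omega))
        rw [hcongr, pasc_F m _ (preE_cur0 (2+m) (by omega))
          (preE_cur1 (2+m) (by omega)) j' (by omega)]
        have : 2+m-1 = m+1 := by omega
        rw [this]
      · rw [if_neg (by omega), if_pos (by omega), hrow_cur j' hj',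
          preE_lo (2+m) (by omega) j' (2+m-1) (by omega)]
    · rw [if_neg (by rintro ⟨h1, h2, h3⟩; omega), ihE i' hi' j' hj']
      by_cases hc : 1 ≤ i' ∧ i' ≤ 1+m
      · rw [if_pos hc, if_pos (by omega)]
      · rw [if_neg hc, if_neg (by omega)]

theorem outer_big (L S : Nat) (hL : 1 ≤ L) (hS10 : 10 ≤ S)
    (sZ : Int) (hsZ : sZ = (S:Int))
    (T : List (List Int)) (hT : Shape T L S)
    (hbase : ∀ i', i' ≤ L → ∀ j', j' ≤ S → E T i' j' = preE i' j')
    (m : Nat) (hm : 1 + m ≤ L) (b : Int) (hb : b = 2 + (m:Int)) :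
    Shape ((PySem.List.pyRange 2 b 1).foldl (fun arr i =>
      (PySem.List.pyRange 10 (sZ+1) 1).foldl (fun arr k =>
        (PySem.List.pyRange 0 10 1).foldl (fun arr a =>
          PySem.List.pySetD arr i (PySem.List.pySetD (PySem.List.pyGetD arr i []) k
            (PySem.List.pyGetD (PySem.List.pyGetD arr i []) k 0 +
             PySem.List.pyGetD (PySem.List.pyGetD arr (i-1) []) (k-a) 0))) arr)
        ((PySem.List.pyRange 2 10 1).foldl (fun arr j =>
          PySem.List.pySetD arr i (PySem.List.pySetD (PySem.List.pyGetD arr i []) j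
            (PySem.List.pyGetD (PySem.List.pyGetD arr (i-1) []) j 0 +
             PySem.List.pyGetD (PySem.List.pyGetD arr i []) (j-1) 0))) arr)) T) L S ∧
    ∀ i', i' ≤ L → ∀ j', j' ≤ S →
      E ((PySem.List.pyRange 2 b 1).foldl (fun arr i =>
        (PySem.List.pyRange 10 (sZ+1) 1).foldl (fun arr k =>
          (PySem.List.pyRange 0 10 1).foldl (fun arr a =>
            PySem.List.pySetD arr i (PySem.List.pySetD (PySem.List.pyGetD arr i []) k
              (PySem.List.pyGetD (PySem.List.pyGetD arr i []) k 0 +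
               PySem.List.pyGetD (PySem.List.pyGetD arr (i-1) []) (k-a) 0))) arr)
          ((PySem.List.pyRange 2 10 1).foldl (fun arr j =>
            PySem.List.pySetD arr i (PySem.List.pySetD (PySem.List.pyGetD arr i []) j
              (PySem.List.pyGetD (PySem.List.pyGetD arr (i-1) []) j 0 +
               PySem.List.pyGetD (PySem.List.pyGetD arr i []) (j-1) 0))) arr)) T) i' j'
        = if 1 ≤ i' ∧ i' ≤ 1 + m then F (i'-1) j' else preE i' j' := by
  subst hb; subst hsZ
  induction m with
  | zero =>
    rw [show PySem.List.pyRange 2 (2 + ((0:Nat):Int)) 1 = [] from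
      PySem.List.pyRange_one_eq_nil (by omega), List.foldl_nil]
    refine ⟨hT, fun i' hi' j' hj' => ?_⟩
    rw [hbase i' hi' j' hj']
    by_cases hc : 1 ≤ i' ∧ i' ≤ 1
    · rw [if_pos hc, show i' = 1 by omega, preE_one]
    · rw [if_neg hc]
  | succ m ih =>
    obtain ⟨ihS, ihE⟩ := ih (by omega)
    rw [show (2:Int) + ((m:Nat)+1:Nat) = 2 + ((m:Int)+1) by push_cast; ring, foldl_pyRange_succ]
    set R := (PySem.List.pyRange 2 (2 + (m:Int)) 1).foldl (fun arr i =>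
      (PySem.List.pyRange 10 ((S:Int)+1) 1).foldl (fun arr k =>
        (PySem.List.pyRange 0 10 1).foldl (fun arr a =>
          PySem.List.pySetD arr i (PySem.List.pySetD (PySem.List.pyGetD arr i []) k
            (PySem.List.pyGetD (PySem.List.pyGetD arr i []) k 0 +
             PySem.List.pyGetD (PySem.List.pyGetD arr (i-1) []) (k-a) 0))) arr)
        ((PySem.List.pyRange 2 10 1).foldl (fun arr j =>
          PySem.List.pySetD arr i (PySem.List.pySetD (PySem.List.pyGetD arr i []) j
            (PySem.List.pyGetD (PySem.List.pyGetD arr (i-1) []) j 0 +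
             PySem.List.pyGetD (PySem.List.pyGetD arr i []) (j-1) 0))) arr)) T with hR
    obtain ⟨pS, pE⟩ := phase_pascal L S R ihS (2 + (m:Int)) (2+m) (by push_cast; ring)
      (by omega) (by omega) 8 (by omega) 10 (by norm_num)
    set P := (PySem.List.pyRange 2 10 1).foldl (fun arr j =>
      PySem.List.pySetD arr (2 + (m:Int)) (PySem.List.pySetD (PySem.List.pyGetD arr (2 + (m:Int)) []) j
        (PySem.List.pyGetD (PySem.List.pyGetD arr (2 + (m:Int) - 1) []) j 0 +
         PySem.List.pyGetD (PySem.List.pyGetD arr (2 + (m:Int)) []) (j-1) 0))) R with hP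
    obtain ⟨wS, wE⟩ := phase_winouter L S P pS (2 + (m:Int)) (2+m) (by push_cast; ring)
      (by omega) (by omega) (S-9) (by omega) ((S:Int)+1) (by omega)
    refine ⟨wS, ?_⟩
    intro i' hi' j' hj'
    rw [wE i' j']
    have hrow_above : ∀ t, t ≤ S → E R (2+m-1) t = F m t := by
      intro t ht
      rw [ihE (2+m-1) (by omega) t ht, if_pos (by omega)]
      have : 2+m-1-1 = m := by omega
      rw [this]
    have hrow_cur : ∀ t, t ≤ S → E R (2+m) t = preE (2+m) t := by
      intro t ht
      rw [ihE (2+m) (by omega) t ht, if_neg (by omega)]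
    have hP_above : ∀ t, t ≤ S → E P (2+m-1) t = F m t := by
      intro t ht
      rw [pE (2+m-1) t, if_neg (by omega)]
      exact hrow_above t ht
    by_cases hI : i' = 2+m
    · subst hI
      by_cases hw : 10 ≤ j'
      · rw [if_pos ⟨rfl, by omega⟩, if_pos (by omega)]
        have h0 : E P (2+m) j' = 0 := by
          rw [pE (2+m) j', if_neg (by rintro ⟨h1, h2, h3⟩; omega), hrow_cur j' hj']
          unfold preE
          rw [if_neg (by rintro ⟨h1, h2, h3⟩; omega), if_neg (by rintro ⟨h1, h2⟩; omega)]
        have hsum : (∑ a ∈ Finset.range 10, E P (2+m-1) (j'-a))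
            = ∑ a ∈ Finset.range 10, F m (j'-a) :=
          Finset.sum_congr rfl (fun a ha => by
            have : a < 10 := Finset.mem_range.mp ha
            exact hP_above (j'-a) (by omega))
        rw [h0, hsum, zero_add]
        have : 2+m-1 = m+1 := by omega
        rw [this]
        show _ = F (m+1) j'
        rw [show F (m+1) j' = win (F m) j' from rfl, win_ge10 _ _ hw]
      · rw [if_neg (by rintro ⟨h1, h2, h3⟩; omega), pE (2+m) j']
        by_cases hJ : 2 ≤ j'
        · rw [if_pos ⟨rfl, by omega⟩, if_pos (by omega)]
          have hcongr : pascFill (E R (2+m-1)) (E R (2+m)) j'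
              = pascFill (F m) (fun t => preE (2+m) t) j' :=
            pascFill_congr _ _ _ _ j' (fun t ht => hrow_above t (by omega))
              (fun t ht => hrow_cur t (by omega))
          rw [hcongr, pasc_F m _ (preE_cur0 (2+m) (by omega))
            (preE_cur1 (2+m) (by omega)) j' (by omega)]
          have : 2+m-1 = m+1 := by omega
          rw [this]
        · rw [if_neg (by omega), if_pos (by omega), hrow_cur j' hj',
            preE_lo (2+m) (by omega) j' (2+m-1) (by omega)]
    · rw [if_neg (by rintro ⟨h1, h2, h3⟩; omega), pE i' j', if_neg (by rintro ⟨h1, h2, h3⟩; omega),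
        ihE i' hi' j' hj']
      by_cases hc : 1 ≤ i' ∧ i' ≤ 1+m
      · rw [if_pos hc, if_pos (by omega)]
      · rw [if_neg hc, if_neg (by omega)]


theorem E_init (L S : Nat) :
    Shape ((PySem.List.pyRange 0 ((L:Int)+1) 1).map (fun _ => List.replicate (((S:Int)+1)).toNat (0:Int))) L S ∧
    ∀ i' j', E ((PySem.List.pyRange 0 ((L:Int)+1) 1).map (fun _ => List.replicate (((S:Int)+1)).toNat (0:Int))) i' j' = 0 := by
  set T0 := (PySem.List.pyRange 0 ((L:Int)+1) 1).map (fun _ => List.replicate (((S:Int)+1)).toNat (0:Int)) with hT0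
  have hlen : T0.length = L + 1 := by
    rw [hT0, List.length_map, PySem.List.length_pyRange_one]; omega
  have hrows : ∀ r ∈ T0, r.length = S + 1 := by
    intro r hr
    rw [hT0] at hr
    obtain ⟨x, _, rfl⟩ := List.mem_map.mp hr
    rw [List.length_replicate]; omega
  refine ⟨⟨hlen, hrows⟩, ?_⟩
  intro i' j'
  unfold E
  have hrow : T0.getD i' [] = [] ∨ T0.getD i' [] ∈ T0 := by
    by_cases hi : i' < T0.length
    · right; exact getD_mem' _ _ _ hi
    · left; exact List.getD_eq_default _ _ (by omega)
  have hval : ∀ (r : List Int), r = [] ∨ r ∈ T0 → r.getD j' 0 = 0 := by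
    intro r hr
    rcases hr with rfl | hr
    · simp
    · rw [hT0] at hr
      obtain ⟨x, _, rfl⟩ := List.mem_map.mp hr
      by_cases hj : j' < ((S:Int)+1).toNat
      · rw [List.getD_eq_getElem _ _ (by simpa using hj), List.getElem_replicate]
      · rw [List.getD_eq_default _ _ (by simpa using hj)]
  exact hval _ hrow

theorem A_char (L S : Nat) (hL : 1 ≤ L) (hS : 1 ≤ S) :
    solution (L:Int) (S:Int) = F (L-1) S := by
  simp only [solution]
  obtain ⟨S0, E0⟩ := E_init L S
  set T0 := (PySem.List.pyRange 0 ((L:Int)+1) 1).map (fun _ => List.replicate (((S:Int)+1)).toNat (0:Int)) with hT0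
  by_cases hs10 : (S:Int) < 10
  · rw [if_pos hs10]
    obtain ⟨s1, e1'⟩ := phase_row1 L S hL T0 S0 S le_rfl ((S:Int)+1) (by push_cast; ring)
    set T1 := (PySem.List.pyRange 1 ((S:Int)+1) 1).foldl (fun arr i =>
      PySem.List.pySetD arr 1 (PySem.List.pySetD (PySem.List.pyGetD arr 1 []) i 1)) T0 with hT1
    obtain ⟨s2, e2'⟩ := phase_col1 L S hS T1 s1 L le_rfl ((L:Int)+1) (by push_cast; ring)
    set T2 := (PySem.List.pyRange 1 ((L:Int)+1) 1).foldl (fun arr i =>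
      PySem.List.pySetD arr i (PySem.List.pySetD (PySem.List.pyGetD arr i []) 1 1)) T1 with hT2
    have hbase : ∀ i', i' ≤ L → ∀ j', j' ≤ S → E T2 i' j' = preE i' j' := by
      intro i' hi' j' hj'
      rw [e2' i' j']
      unfold preE
      by_cases cA : j' = 1 ∧ 1 ≤ i' ∧ i' ≤ L
      · rw [if_pos cA]
        by_cases cB : i' = 1 ∧ 1 ≤ j' ∧ j' ≤ 9
        · rw [if_pos cB]
        · rw [if_neg cB, if_pos ⟨cA.1, by omega⟩]
      · rw [if_neg cA, e1' i' j']
        by_cases cC : i' = 1 ∧ 1 ≤ j' ∧ j' ≤ S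
        · rw [if_pos cC, if_pos ⟨cC.1, by omega⟩]
        · rw [if_neg cC, E0 i' j']
          by_cases cB : i' = 1 ∧ 1 ≤ j' ∧ j' ≤ 9
          · exact absurd ⟨cB.1, cB.2.1, hj'⟩ cC
          · rw [if_neg cB]
            by_cases cD : j' = 1 ∧ 1 ≤ i'
            · exact absurd ⟨cD.1, cD.2, hi'⟩ cA
            · rw [if_neg cD]
    obtain ⟨s3, e3'⟩ := outer_small L S hL hS (by omega) (S:Int) rfl T2 s2 hbase
      (L-1) (by omega) ((L:Int)+1) (by omega)
    rw [pyGetD_toNat _ _ _ (by omega), pyGetD_toNat _ _ _ (by omega)]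
    show E _ ((L:Int)).toNat ((S:Int)).toNat = _
    rw [show ((L:Int)).toNat = L by omega, show ((S:Int)).toNat = S by omega]
    rw [e3' L le_rfl S le_rfl, if_pos ⟨hL, by omega⟩]
  · rw [if_neg hs10]
    obtain ⟨s1, e1'⟩ := phase_col1 L S hS T0 S0 L le_rfl ((L:Int)+1) (by push_cast; ring)
    set T1 := (PySem.List.pyRange 1 ((L:Int)+1) 1).foldl (fun arr i =>
      PySem.List.pySetD arr i (PySem.List.pySetD (PySem.List.pyGetD arr i []) 1 1)) T0 with hT1
    obtain ⟨s2, e2'⟩ := phase_row1 L S hL T1 s1 9 (by omega) 10 (by norm_num)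
    set T2 := (PySem.List.pyRange 1 10 1).foldl (fun arr i =>
      PySem.List.pySetD arr 1 (PySem.List.pySetD (PySem.List.pyGetD arr 1 []) i 1)) T1 with hT2
    have hbase : ∀ i', i' ≤ L → ∀ j', j' ≤ S → E T2 i' j' = preE i' j' := by
      intro i' hi' j' hj'
      rw [e2' i' j']
      unfold preE
      by_cases cB : i' = 1 ∧ 1 ≤ j' ∧ j' ≤ 9
      · rw [if_pos cB, if_pos cB]
      · rw [if_neg cB, if_neg cB, e1' i' j']
        by_cases cD : j' = 1 ∧ 1 ≤ i' ∧ i' ≤ L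
        · rw [if_pos cD, if_pos ⟨cD.1, cD.2.1⟩]
        · rw [if_neg cD, E0 i' j']
          by_cases cE : j' = 1 ∧ 1 ≤ i'
          · exact absurd ⟨cE.1, cE.2, hi'⟩ cD
          · rw [if_neg cE]
    obtain ⟨s3, e3'⟩ := outer_big L S hL (by omega) (S:Int) rfl T2 s2 hbase
      (L-1) (by omega) ((L:Int)+1) (by omega)
    rw [pyGetD_toNat _ _ _ (by omega), pyGetD_toNat _ _ _ (by omega)]
    show E _ ((L:Int)).toNat ((S:Int)).toNat = _
    rw [show ((L:Int)).toNat = L by omega, show ((S:Int)).toNat = S by omega]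
    rw [e3' L le_rfl S le_rfl, if_pos ⟨hL, by omega⟩]

def Psum (m j : Nat) : Int := ∑ t ∈ Finset.range (j+1), N m t

theorem sum_map_range (f : Nat → Int) (n : Nat) :
    ((List.range n).map f).sum = ∑ t ∈ Finset.range n, f t := by
  induction n with
  | zero => simp
  | succ n ih => rw [List.range_succ, List.map_append, List.sum_append, Finset.sum_range_succ, ih]; simp

theorem getD_map_range' (f : Nat → Int) (n j : Nat) (hj : j < n) :
    ((List.range n).map f).getD j 0 = f j := by
  rw [List.getD_eq_getElem _ _ (by simp; omega)]
  simp

theorem g_init (S : Nat) :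
    ([1] ++ List.replicate S (0:Int)) = (List.range (S+1)).map (fun j => N 0 j) := by
  symm
  apply List.ext_getElem (by simp [Nat.add_comm])
  intro i h1 h2
  rcases i with _ | i
  · simp [N]
  · simp [N, List.getElem_append_right]

theorem pfx (xs : List Int) : ∀ (p0 : List Int) (t0 : Int),
    xs.foldl (fun (st : List Int × Int) x => (st.1 ++ [st.2 + x], st.2 + x)) (p0, t0)
      = (p0 ++ (List.range xs.length).map (fun j => t0 + (xs.take (j+1)).sum), t0 + xs.sum) := by
  induction xs with
  | nil => intro p0 t0; simp
  | cons x xs ih =>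
    intro p0 t0
    rw [List.foldl_cons, ih]
    refine Prod.ext ?_ ?_
    · show (p0 ++ [t0 + x]) ++ _ = p0 ++ _
      rw [List.append_assoc]
      congr 1
      rw [List.length_cons, List.range_succ_eq_map, List.map_cons, List.map_map,
        List.singleton_append]
      congr 1
      · rw [List.take_succ_cons, List.take_zero, List.sum_cons, List.sum_nil]
        ring
      · apply List.map_congr_left
        intro a _
        show t0 + x + (xs.take (a+1)).sum = t0 + ((x :: xs).take (a+1+1)).sum
        rw [List.take_succ_cons, List.sum_cons]
        ring
    · show t0 + x + xs.sum = t0 + (x :: xs).sum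
      rw [List.sum_cons]; ring

theorem Psum_sub (m j : Nat) (hj : 10 ≤ j) :
    Psum m j - Psum m (j-10) = ∑ a ∈ Finset.range 10, N m (j-a) := by
  unfold Psum
  have hsplit : ∑ t ∈ Finset.range (j+1), N m t
      = (∑ t ∈ Finset.range (j-10+1), N m t) + ∑ t ∈ Finset.Ico (j-10+1) (j+1), N m t := by
    simp only [Finset.range_eq_Ico]
    rw [Finset.sum_Ico_consecutive _ (by omega : 0 ≤ j-10+1) (by omega : j-10+1 ≤ j+1)]
  rw [hsplit]
  have hbij : ∑ t ∈ Finset.Ico (j-10+1) (j+1), N m t = ∑ a ∈ Finset.range 10, N m (j-a) := by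
    apply Finset.sum_nbij' (fun t => j - t) (fun a => j - a)
    · intro t ht; simp only [Finset.mem_Ico] at ht; simp only [Finset.mem_range]; omega
    · intro a ha; simp only [Finset.mem_range] at ha; simp only [Finset.mem_Ico]; omega
    · intro t ht; simp only [Finset.mem_Ico] at ht; omega
    · intro a ha; simp only [Finset.mem_range] at ha; omega
    · intro t ht
      simp only [Finset.mem_Ico] at ht
      congr 1
      omega
  rw [hbij]; ring

theorem B_step (S m : Nat) (P : List Int)
    (hP : P = (((List.range (S+1)).map (fun j => N m j)).foldl (fun (st : List Int × Int) x =>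
      (st.1 ++ [st.2 + x], st.2 + x)) ([], 0)).1) :
    (PySem.List.pyRange 0 ((S:Int)+1) 1).map (fun j =>
      if j < 10 then PySem.List.pyGetD P j 0
      else PySem.List.pyGetD P j 0 - PySem.List.pyGetD P (j-10) 0)
    = (List.range (S+1)).map (fun j => N (m+1) j) := by
  have hPe : P = (List.range (S+1)).map (fun j =>
      (((List.range (S+1)).map (fun t => N m t)).take (j+1)).sum) := by
    rw [hP, pfx]
    simp
  have hPD : ∀ j : Nat, j ≤ S → P.getD j 0 = Psum m j := by
    intro j hj
    rw [hPe, getD_map_range' _ _ _ (by omega)]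
    have h1 : (((List.range (S+1)).map (fun t => N m t)).take (j+1))
        = (List.range (j+1)).map (fun t => N m t) := by
      rw [← List.map_take, List.take_range, show min (j+1) (S+1) = j+1 by omega]
    rw [h1, sum_map_range]
    rfl
  rw [show (S:Int)+1 = ((S+1:Nat):Int) by push_cast; ring, PySem.List.pyRange_zero_nat, List.map_map]
  apply List.map_congr_left
  intro j hj
  have hjS : j ≤ S := by simpa using Nat.lt_succ_iff.mp (List.mem_range.mp hj)
  show (if ((j:Int)) < 10 then PySem.List.pyGetD P (j:Int) 0
      else PySem.List.pyGetD P (j:Int) 0 - PySem.List.pyGetD P ((j:Int)-10) 0) = N (m+1) j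
  by_cases hj10 : j < 10
  · rw [if_pos (by exact_mod_cast hj10), pyGetD_toNat _ _ _ (by omega),
      show ((j:Int)).toNat = j by omega, hPD j hjS]
    show Psum m j = win (N m) j
    rw [win_le9 _ _ (by omega)]
    rfl
  · rw [if_neg (by push_cast; omega), pyGetD_toNat _ _ _ (by omega),
      show ((j:Int)).toNat = j by omega, hPD j hjS,
      pyGetD_toNat _ _ _ (by omega), show ((j:Int)-10).toNat = j - 10 by omega,
      hPD (j-10) (by omega), Psum_sub m j (by omega)]
    show _ = win (N m) j
    rw [win_ge10 _ _ (by omega)]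

theorem B_loop (S : Nat) (m : Nat) (b : Int) (hb : b = (m:Int)) :
    (PySem.List.pyRange 0 b 1).foldl (fun g _ =>
      let p := (g.foldl (fun (st : List Int × Int) x =>
        (st.1 ++ [st.2 + x], st.2 + x)) ([], 0)).1
      (PySem.List.pyRange 0 ((S:Int)+1) 1).map (fun j =>
        if j < 10 then PySem.List.pyGetD p j 0
        else PySem.List.pyGetD p j 0 - PySem.List.pyGetD p (j-10) 0))
      ((List.range (S+1)).map (fun j => N 0 j))
    = (List.range (S+1)).map (fun j => N m j) := by
  subst hb
  induction m with
  | zero =>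
    rw [show ((0:Nat):Int) = 0 from rfl, PySem.List.pyRange_one_eq_nil (le_refl 0), List.foldl_nil]
  | succ m ih =>
    rw [show (((m:Nat)+1:Nat):Int) = 0 + ((m:Int)+1) by push_cast; ring, foldl_pyRange_succ,
      show (0:Int) + (m:Int) = (m:Int) by ring, ih]
    exact B_step S m _ rfl

theorem B_char (L S : Nat) (hL : 1 ≤ L) (hS : 1 ≤ S) :
    solution_alt (L:Int) (S:Int) = F (L-1) S := by
  simp only [solution_alt]
  rw [show ((S:Int)).toNat = S by omega, g_init S,
    B_loop S (L-1) ((L:Int)-1) (by omega)]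
  rw [show PySem.List.pyRange 1 10 1 = [1,2,3,4,5,6,7,8,9] from by decide]
  simp only [List.foldl_cons, List.foldl_nil]
  rw [F_eq_dsum_N]
  unfold dsum
  simp only [Finset.sum_range_succ, Finset.sum_range_zero]
  have hterm : ∀ (dZ : Int) (d : Nat), dZ = (d:Int) → 1 ≤ d → d ≤ 9 →
      (if (0:Int) ≤ (S:Int) - dZ then
        PySem.List.pyGetD ((List.range (S+1)).map (fun j => N (L-1) j)) ((S:Int) - dZ) 0 else 0)
      = if 1 ≤ d ∧ d ≤ S then N (L-1) (S-d) else 0 := by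
    intro dZ d hdZ h1 h9
    subst hdZ
    by_cases hds : d ≤ S
    · rw [if_pos (by omega), if_pos ⟨h1, hds⟩, pyGetD_toNat _ _ _ (by omega),
        show ((S:Int) - (d:Int)).toNat = S - d by omega, getD_map_range' _ _ _ (by omega)]
    · rw [if_neg (by omega), if_neg (by tauto)]
  rw [hterm 1 1 (by norm_num) (by omega) (by omega),
    hterm 2 2 (by norm_num) (by omega) (by omega),
    hterm 3 3 (by norm_num) (by omega) (by omega),
    hterm 4 4 (by norm_num) (by omega) (by omega),
    hterm 5 5 (by norm_num) (by omega) (by omega),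
    hterm 6 6 (by norm_num) (by omega) (by omega),
    hterm 7 7 (by norm_num) (by omega) (by omega),
    hterm 8 8 (by norm_num) (by omega) (by omega),
    hterm 9 9 (by norm_num) (by omega) (by omega),
    if_neg (show ¬(1 ≤ 0 ∧ 0 ≤ S) by rintro ⟨h, _⟩; omega)]
  ring

-- ===== VERDICT (by name: the statement is the Claim_ definition above) =====
theorem solution_spec : Claim_equal_solution := by
  intro l s hdom hpre
  unfold Spec_solution
  rcases hpre with ⟨hl, hs⟩ | ⟨hl0, hs0⟩
  · obtain ⟨L, rfl⟩ := Int.eq_ofNat_of_zero_le (by omega : (0:Int) ≤ l)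
    obtain ⟨S, rfl⟩ := Int.eq_ofNat_of_zero_le (by omega : (0:Int) ≤ s)
    rw [A_char L S (by exact_mod_cast hl) (by exact_mod_cast hs),
        B_char L S (by exact_mod_cast hl) (by exact_mod_cast hs)]
  · subst hl0; subst hs0; decide
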